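-- pv_equiv track=rewrite | github.com/ljcleo/hardcore-logic | prepare/src/skyscraper/gen_uns_5×5.py | _compute_clues
-- ===== SOURCE A (Python) =====
-- def _compute_clues(grid):
--     size = len(grid)
--     top, bottom, left, right = [0]*size, [0]*size, [0]*size, [0]*size
--     for col in range(size):
--         max_height = visible = 0
--         for row in range(size):
--             if grid[row][col] > max_height:
--                 max_height = grid[row][col]
--                 visible += 1
--         top[col] = visible
--     for col in range(size):
--         max_height = visible = 0
--         for row in range(size-1, -1, -1):
--             if grid[row][col] > max_height:
--                 max_height = grid[row][col]
--                 visible += 1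
--         bottom[col] = visible
--     for row in range(size):
--         max_height = visible = 0
--         for col in range(size):
--             if grid[row][col] > max_height:
--                 max_height = grid[row][col]
--                 visible += 1
--         left[row] = visible
--     for row in range(size):
--         max_height = visible = 0
--         for col in range(size-1, -1, -1):
--             if grid[row][col] > max_height:
--                 max_height = grid[row][col]
--                 visible += 1
--         right[row] = visible
--     return top, bottom, left, right
-- ===== SOURCE B (Python) =====
-- def _compute_clues(grid):
--     n = len(grid)
--
--     def vis(seq):
--         # an element is visible iff it is positive and strictly taller
--         # than every element that comes before it in the sequence
--         return sum(1 for i, h in enumerate(seq) if h > 0 and all(p < h for p in seq[:i]))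
--
--     cols = [[row[c] for row in grid] for c in range(n)]
--     top = [vis(col) for col in cols]
--     bottom = [vis(col[::-1]) for col in cols]
--     left = [vis(row[:n]) for row in grid]
--     right = [vis(row[:n][::-1]) for row in grid]
--     return top, bottom, left, right
-- ===== Notes on version B (the rewrite author's own statement) =====
-- stated objective: alternative
-- what changed: Replaces A's running-maximum state machine with a stateless characterization: an element is visible iff it is positive and strictly taller than every earlier element, counted by a per-element prefix check over explicitly built row/column views; Pre_ excludes only ragged grids (a row shorter than the row count) on which A raises IndexError.
import Mathlib
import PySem

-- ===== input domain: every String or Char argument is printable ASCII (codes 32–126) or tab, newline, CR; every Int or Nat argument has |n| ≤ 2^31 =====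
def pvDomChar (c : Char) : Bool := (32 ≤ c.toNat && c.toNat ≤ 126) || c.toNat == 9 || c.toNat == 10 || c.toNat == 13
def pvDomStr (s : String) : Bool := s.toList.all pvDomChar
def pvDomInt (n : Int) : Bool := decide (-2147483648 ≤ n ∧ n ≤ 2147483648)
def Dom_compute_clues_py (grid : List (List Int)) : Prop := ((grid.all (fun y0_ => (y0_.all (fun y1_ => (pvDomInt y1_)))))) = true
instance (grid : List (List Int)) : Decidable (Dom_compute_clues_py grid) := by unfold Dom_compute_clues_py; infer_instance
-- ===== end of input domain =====

-- B replaces A's running-maximum state machine by a stateless characterization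
-- (an element is visible iff positive and taller than every earlier one); objective: alternative.

-- grid[row][col] (indices in range under Pre_)
def pvAt (grid : List (List Int)) (row col : Int) : Int :=
  PySem.List.pyGetD (PySem.List.pyGetD grid row []) col 0

-- ===== PORT A =====
def compute_clues_py (grid : List (List Int)) : List Int × List Int × List Int × List Int :=
  let size : Int := (grid.length : Int)
  let top := (PySem.List.pyRange 0 size 1).map (fun col =>
    ((PySem.List.pyRange 0 size 1).foldl (fun (st : Int × Int) row =>
      if pvAt grid row col > st.1 then (pvAt grid row col, st.2 + 1) else st) (0, 0)).2)
  let bottom := (PySem.List.pyRange 0 size 1).map (fun col =>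
    ((PySem.List.pyRange (size - 1) (-1) (-1)).foldl (fun (st : Int × Int) row =>
      if pvAt grid row col > st.1 then (pvAt grid row col, st.2 + 1) else st) (0, 0)).2)
  let left := (PySem.List.pyRange 0 size 1).map (fun row =>
    ((PySem.List.pyRange 0 size 1).foldl (fun (st : Int × Int) col =>
      if pvAt grid row col > st.1 then (pvAt grid row col, st.2 + 1) else st) (0, 0)).2)
  let right := (PySem.List.pyRange 0 size 1).map (fun row =>
    ((PySem.List.pyRange (size - 1) (-1) (-1)).foldl (fun (st : Int × Int) col =>
      if pvAt grid row col > st.1 then (pvAt grid row col, st.2 + 1) else st) (0, 0)).2)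
  (top, bottom, left, right)

-- ===== PORT B =====
-- vis(seq): count the elements that are positive and strictly taller than every earlier element
def pvVis (seq : List Int) : Int :=
  ((seq.zipIdx).filter (fun p =>
    decide (0 < p.1) && (seq.take p.2).all (fun q => decide (q < p.1)))).length

def compute_clues_py_alt (grid : List (List Int)) : List Int × List Int × List Int × List Int :=
  let n : Int := (grid.length : Int)
  let cols := (PySem.List.pyRange 0 n 1).map (fun c =>
    grid.map (fun row => PySem.List.pyGetD row c 0))
  let top := cols.map pvVis
  let bottom := cols.map (fun col => pvVis col.reverse)
  let left := grid.map (fun row => pvVis (PySem.List.slice row none (some n)))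
  let right := grid.map (fun row => pvVis (PySem.List.slice row none (some n)).reverse)
  (top, bottom, left, right)

-- ===== PRECONDITION & SPEC =====
-- Pre_ excludes exactly the ragged grids on which A raises IndexError
-- (some row shorter than the number of rows).
def Pre_compute_clues_py (grid : List (List Int)) : Prop :=
  ∀ r ∈ grid, grid.length ≤ r.length
instance (grid : List (List Int)) : Decidable (Pre_compute_clues_py grid) := by
  unfold Pre_compute_clues_py; infer_instance

def pvWitness_compute_clues_py : List (List Int) := [[2, 1], [1, 2]]

def Spec_compute_clues_py (grid : List (List Int)) (out : List Int × List Int × List Int × List Int) : Prop := out = compute_clues_py_alt grid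
instance (grid : List (List Int)) (out : List Int × List Int × List Int × List Int) : Decidable (Spec_compute_clues_py grid out) := by unfold Spec_compute_clues_py; infer_instance

-- ===== CLAIM (what is proved, stated in full; the proofs are below) =====
def Claim_equal_compute_clues_py : Prop := ∀ (grid : List (List Int)), Dom_compute_clues_py grid → Pre_compute_clues_py grid → Spec_compute_clues_py grid (compute_clues_py grid)

-- ===== LEMMAS AND PROOFS =====

theorem pvFoldl_max_lt (l : List Int) (a x : Int) :
    l.foldl max a < x ↔ a < x ∧ ∀ q ∈ l, q < x := by
  induction l generalizing a with
  | nil => simp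
  | cons b l ih =>
    simp only [List.foldl_cons, ih, max_lt_iff, List.mem_cons]
    constructor
    · rintro ⟨⟨h1, h2⟩, h3⟩
      exact ⟨h1, fun q hq => hq.elim (fun e => e ▸ h2) (h3 q)⟩
    · rintro ⟨h1, h2⟩
      exact ⟨⟨h1, h2 b (Or.inl rfl)⟩, fun q hq => h2 q (Or.inr hq)⟩

-- pvVis of a snoc: the appended element counts iff it beats the prefix's running max
theorem pvVis_snoc (pre : List Int) (x : Int) :
    pvVis (pre ++ [x]) = pvVis pre + (if pre.foldl max 0 < x then 1 else 0) := by
  unfold pvVis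
  rw [List.zipIdx_append, List.filter_append, List.length_append]
  have hold : ∀ (p : Int × Nat), p ∈ pre.zipIdx →
      ((pre ++ [x]).take p.2 = pre.take p.2) := by
    rintro ⟨a, i⟩ hp
    have := List.mem_zipIdx hp
    simp only [List.take_append]
    have : i - pre.length = 0 := by omega
    simp [this]
  have h1 : (pre.zipIdx.filter (fun p =>
      decide (0 < p.1) && ((pre ++ [x]).take p.2).all (fun q => decide (q < p.1))))
      = (pre.zipIdx.filter (fun p =>
      decide (0 < p.1) && (pre.take p.2).all (fun q => decide (q < p.1)))) := by
    apply List.filter_congr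
    intro p hp
    rw [hold p hp]
  rw [h1]
  have h2 : ([x].zipIdx (0 + pre.length)) = [(x, pre.length)] := by simp
  rw [h2]
  have htake : (pre ++ [x]).take pre.length = pre := List.take_left
  by_cases h : pre.foldl max 0 < x
  · have := (pvFoldl_max_lt pre 0 x).mp h
    simp only [List.filter_cons, List.filter_nil, htake]
    have : (decide (0 < x) && pre.all fun q => decide (q < x)) = true := by
      simp only [Bool.and_eq_true, decide_eq_true_eq, List.all_eq_true]
      exact ⟨this.1, fun q hq => by simpa using this.2 q hq⟩
    simp [this, h]
  · have hnot : ¬ (0 < x ∧ ∀ q ∈ pre, q < x) := fun hc => h ((pvFoldl_max_lt pre 0 x).mpr hc)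
    simp only [List.filter_cons, List.filter_nil, htake]
    have : (decide (0 < x) && pre.all fun q => decide (q < x)) = false := by
      by_contra hb
      apply hnot
      simp only [Bool.not_eq_false, Bool.and_eq_true, decide_eq_true_eq, List.all_eq_true] at hb
      exact ⟨hb.1, fun q hq => by simpa using hb.2 q hq⟩
    simp [this, h]

-- the foldl max over a snoc, ≥ case
theorem pvFoldl_max_snoc (pre : List Int) (x : Int) :
    (pre ++ [x]).foldl max 0 = max (pre.foldl max 0) x := by
  simp

-- A's running-max scan computes (running max, pvVis) on any value list
theorem pvScan_eq (xs pre : List Int) :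
    xs.foldl (fun (st : Int × Int) h =>
      if h > st.1 then (h, st.2 + 1) else st) (pre.foldl max 0, pvVis pre)
    = ((pre ++ xs).foldl max 0, pvVis (pre ++ xs)) := by
  induction xs generalizing pre with
  | nil => simp
  | cons x xs ih =>
    simp only [List.foldl_cons]
    have hassoc : pre ++ x :: xs = (pre ++ [x]) ++ xs := by simp
    by_cases h : pre.foldl max 0 < x
    · have hs : (if x > pre.foldl max 0 then (x, pvVis pre + 1)
          else (pre.foldl max 0, pvVis pre)) = (x, pvVis pre + 1) := by simp [h]
      have hm : (pre ++ [x]).foldl max 0 = x := by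
        rw [pvFoldl_max_snoc]; omega
      have hv : pvVis (pre ++ [x]) = pvVis pre + 1 := by
        rw [pvVis_snoc]; simp [h]
      rw [hassoc, ← ih (pre ++ [x]), hm, hv, hs]
    · have hs : (if x > pre.foldl max 0 then (x, pvVis pre + 1)
          else (pre.foldl max 0, pvVis pre)) = (pre.foldl max 0, pvVis pre) := by simp [h]
      have hm : (pre ++ [x]).foldl max 0 = pre.foldl max 0 := by
        rw [pvFoldl_max_snoc]; omega
      have hv : pvVis (pre ++ [x]) = pvVis pre := by
        rw [pvVis_snoc]; simp [h]
      rw [hassoc, ← ih (pre ++ [x]), hm, hv, hs]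

-- A's inner index-loop is pvVis of the list of fetched values
theorem pvFold_eq_vis (idxs : List Int) (f : Int → Int) :
    (idxs.foldl (fun (st : Int × Int) i =>
      if f i > st.1 then (f i, st.2 + 1) else st) (0, 0)).2
    = pvVis (idxs.map f) := by
  have h := pvScan_eq (List.map f idxs) []
  rw [List.foldl_map] at h
  simp only [List.nil_append] at h
  have h0 : (([] : List Int).foldl max 0, pvVis []) = ((0 : Int), (0 : Int)) := by
    simp [pvVis]
  rw [h0] at h
  rw [h]

-- indexing a list over range(b) with b ≤ len is take b
theorem pvMap_pyGetD_take {α : Type} (xs : List α) (b : Int) (d : α)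
    (h0 : 0 ≤ b) (h : b.toNat ≤ xs.length) :
    (PySem.List.pyRange 0 b 1).map (fun j => PySem.List.pyGetD xs j d)
      = xs.take b.toNat := by
  obtain ⟨n, rfl⟩ : ∃ n : Nat, b = (n : Int) := ⟨b.toNat, (Int.toNat_of_nonneg h0).symm⟩
  simp only [Int.toNat_natCast] at h ⊢
  rw [PySem.List.pyRange_zero_natCast, List.map_map]
  apply List.ext_getElem
  · simp [h]
  · intro i hi1 hi2
    simp only [List.getElem_map, List.getElem_range, Function.comp_apply,
      PySem.List.pyGetD_natCast, List.getElem_take]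
    simp at hi1
    rw [List.getD_eq_getElem _ _ (by omega)]

-- A's column fetch list = B's column view
theorem pvCol_eq (grid : List (List Int)) (c : Int) :
    (PySem.List.pyRange 0 (grid.length : Int) 1).map (fun r => pvAt grid r c)
      = grid.map (fun row => PySem.List.pyGetD row c 0) := by
  have : (fun r => pvAt grid r c)
      = (fun row => PySem.List.pyGetD row c 0) ∘ (fun r => PySem.List.pyGetD grid r []) := by
    funext r; rfl
  rw [this, ← List.map_map, pvMap_pyGetD_take grid _ [] (Int.natCast_nonneg _) (by simp)]
  simp

-- A's row fetch list = B's truncated row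
theorem pvRow_eq (grid : List (List Int))
    (hpre : ∀ r ∈ grid, grid.length ≤ r.length)
    (i : Nat) (h1 : i < grid.length) :
    (PySem.List.pyRange 0 (grid.length : Int) 1).map (fun c => pvAt grid (i : Int) c)
      = PySem.List.slice grid[i] none (some (grid.length : Int)) := by
  have hrow := hpre grid[i] (List.getElem_mem h1)
  rw [PySem.List.slice_to _ (Int.natCast_nonneg _), Int.toNat_natCast]
  have : (fun c => pvAt grid (i : Int) c)
      = fun c => PySem.List.pyGetD grid[i] c 0 := by
    funext c
    unfold pvAt
    rw [PySem.List.pyGetD_eq_getElem grid [] (by omega) (by exact_mod_cast h1)]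
    simp only [Int.toNat_natCast]
  rw [this, pvMap_pyGetD_take _ _ _ (Int.natCast_nonneg _) (by simpa using hrow)]
  simp

theorem pvMain (grid : List (List Int))
    (hpre : ∀ r ∈ grid, grid.length ≤ r.length) :
    compute_clues_py grid = compute_clues_py_alt grid := by
  unfold compute_clues_py compute_clues_py_alt
  simp only [pvFold_eq_vis, PySem.List.pyRange_neg_one_eq_reverse, List.map_reverse,
    List.map_map, Prod.mk.injEq, sub_add_cancel, neg_add_cancel]
  refine ⟨?_, ?_, ?_, ?_⟩
  · -- top
    apply List.map_congr_left
    intro c _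
    exact congrArg pvVis (pvCol_eq grid c)
  · -- bottom
    apply List.map_congr_left
    intro c _
    exact congrArg pvVis (congrArg List.reverse (pvCol_eq grid c))
  · -- left
    apply List.ext_getElem
    · simp [PySem.List.length_pyRange_one]
    · intro k hk1 hk2
      simp only [List.getElem_map, PySem.List.getElem_pyRange_one, zero_add]
      have hk : k < grid.length := by
        simp [PySem.List.length_pyRange_one] at hk1; omega
      rw [pvRow_eq grid hpre k hk]
  · -- right
    apply List.ext_getElem
    · simp [PySem.List.length_pyRange_one]
    · intro k hk1 hk2
      simp only [List.getElem_map, PySem.List.getElem_pyRange_one, zero_add]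
      have hk : k < grid.length := by
        simp [PySem.List.length_pyRange_one] at hk1; omega
      rw [pvRow_eq grid hpre k hk]

-- ===== VERDICT (by name: the statement is the Claim_ definition above) =====
theorem compute_clues_py_spec : Claim_equal_compute_clues_py := by
  intro grid _ hpre
  unfold Spec_compute_clues_py
  exact pvMain grid hpre
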